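-- pv_equiv track=rewrite | github.com/Adel2k/PhantomStrike | get_cve.py | get_cve_from_line
-- ===== SOURCE A (Python) =====
-- def get_cve_from_line(s: str) -> str:
-- 	i = 0;
-- 	while i < len(s):
-- 		if s[i:i+4] == "CVE-":
-- 			cve = ""
-- 			while i < len(s) and s[i] != " " and s[i] != ",":
-- 				cve += s[i]
-- 				i += 1
-- 			return cve
-- 		i += 1
-- 	return ""
-- ===== SOURCE B (Python) =====
-- def get_cve_from_line(s: str) -> str:
--     i = s.find("CVE-")
--     if i == -1:
--         return ""
--     end = len(s)
--     for j in (s.find(" ", i), s.find(",", i)):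
--         if j != -1:
--             end = min(end, j)
--     return s[i:end]
-- ===== Notes on version B (the rewrite author's own statement) =====
-- stated objective: faster
-- what changed: Replaces A's manual character-by-character outer scan and inner accumulation loop with one str.find call locating the CVE prefix and two delimiter find calls plus a slice cutting the token.
import Mathlib
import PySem

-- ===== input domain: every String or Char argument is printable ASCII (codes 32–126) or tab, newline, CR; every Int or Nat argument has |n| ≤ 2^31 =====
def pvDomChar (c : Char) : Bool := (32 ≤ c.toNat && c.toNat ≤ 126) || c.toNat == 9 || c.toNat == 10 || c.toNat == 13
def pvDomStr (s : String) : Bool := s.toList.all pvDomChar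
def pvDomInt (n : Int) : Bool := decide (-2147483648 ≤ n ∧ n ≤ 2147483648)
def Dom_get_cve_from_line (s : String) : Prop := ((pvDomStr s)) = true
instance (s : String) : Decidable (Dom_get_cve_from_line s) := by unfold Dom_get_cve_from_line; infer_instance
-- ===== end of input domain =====

-- B replaces A's manual index loops by str.find + slicing (measured faster; return value proved equal).

-- ===== PORT A =====
-- inner while loop of A: accumulate characters until ' ' or ',' (the loop runs on the
-- suffix of s starting at the current index i)
def pvInnerA : List Char → List Char
  | [] => []
  | c :: rest => if c ≠ ' ' ∧ c ≠ ',' then c :: pvInnerA rest else []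

-- outer while loop of A: advance i until s[i:i+4] == "CVE-" (Python's clamped slice
-- s[i:i+4] is exactly List.take 4 of the suffix at i)
def pvOuterA : List Char → List Char
  | [] => []
  | c :: rest =>
      if (c :: rest).take 4 = ['C', 'V', 'E', '-'] then pvInnerA (c :: rest)
      else pvOuterA rest

def get_cve_from_line (s : String) : String := String.ofList (pvOuterA s.toList)

-- ===== PORT B =====
def get_cve_from_line_alt (s : String) : String :=
  let cs := s.toList
  let i := PySem.Chars.find cs ['C', 'V', 'E', '-']
  if i = -1 then ""
  else
    let e := [PySem.Chars.findFrom cs [' '] i none,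
              PySem.Chars.findFrom cs [','] i none].foldl
               (fun e j => if j ≠ -1 then min e j else e) (cs.length : Int)
    String.ofList (PySem.List.slice cs (some i) (some e))

-- ===== PRECONDITION & SPEC =====
def Spec_get_cve_from_line (s : String) (out : String) : Prop := out = get_cve_from_line_alt s
instance (s : String) (out : String) : Decidable (Spec_get_cve_from_line s out) := by unfold Spec_get_cve_from_line; infer_instance

-- ===== CLAIM (what is proved, stated in full; the proofs are below) =====
def Claim_equal_get_cve_from_line : Prop := ∀ (s : String), Dom_get_cve_from_line s → Spec_get_cve_from_line s (get_cve_from_line s)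

-- ===== LEMMAS AND PROOFS =====

def pvTok : Char → Bool := fun c => !(c == ' ') && !(c == ',')

theorem pvInnerA_eq_takeWhile (l : List Char) : pvInnerA l = l.takeWhile pvTok := by
  induction l with
  | nil => rfl
  | cons c rest ih =>
      by_cases h : c ≠ ' ' ∧ c ≠ ','
      · have hc : pvTok c = true := by simp [pvTok, h.1, h.2]
        simp [pvInnerA, h, hc, ih]
      · have hc : pvTok c = false := by
          simp only [pvTok, Bool.and_eq_false_iff, Bool.not_eq_false', beq_iff_eq]
          rcases not_and_or.mp h with h1 | h1 <;> simp_all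
        simp [pvInnerA, h, hc]

-- singleton prefix ↔ head
theorem pv_singleton_prefix {d : Char} {u : List Char} : [d] <+: u ↔ u.head? = some d := by
  cases u with
  | nil => simp
  | cons x t => simp [List.cons_prefix_cons, eq_comm]

theorem pv_singleton_prefix_drop {d : Char} {t : List Char} {i : ℕ} :
    [d] <+: t.drop i ↔ t[i]? = some d := by
  rw [pv_singleton_prefix, List.head?_drop]

-- prefix of a drop is an infix
theorem pv_infix_of_prefix_drop {pat cs : List Char} {n : ℕ} (h : pat <+: cs.drop n) :
    pat <:+: cs := by
  obtain ⟨r, hr⟩ := h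
  exact ⟨cs.take n, r, by rw [List.append_assoc, hr, List.take_append_drop]⟩

-- uniqueness: find is the first index at which pat is a prefix of the drop
theorem pv_find_eq {pat cs : List Char} {n : ℕ} (hpre : pat <+: cs.drop n)
    (hmin : ∀ i < n, ¬ pat <+: cs.drop i) : PySem.Chars.find cs pat = (n : Int) := by
  have hnn : 0 ≤ PySem.Chars.find cs pat :=
    (PySem.Chars.find_nonneg_iff _ _).mpr (pv_infix_of_prefix_drop hpre)
  obtain ⟨h1, h2⟩ := PySem.Chars.find_spec hnn
  rcases lt_trichotomy (PySem.Chars.find cs pat).toNat n with h | h | h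
  · exact absurd h1 (hmin _ h)
  · omega
  · exact absurd hpre (h2 _ h)

-- takeWhile length spec
theorem pv_takeWhile_len (p : Char → Bool) (t : List Char) :
    (t.takeWhile p).length ≤ t.length ∧
    (∀ i < (t.takeWhile p).length, ∃ c, t[i]? = some c ∧ p c = true) ∧
    (∀ c, t[(t.takeWhile p).length]? = some c → p c = false) := by
  induction t with
  | nil => simp
  | cons x rest ih =>
      by_cases h : p x = true
      · refine ⟨?_, ?_, ?_⟩
        · simp only [List.takeWhile_cons, h, if_true, List.length_cons]
          have := ih.1; omega
        · intro i hi
          cases i with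
          | zero => exact ⟨x, rfl, h⟩
          | succ j =>
              simp only [List.takeWhile_cons, h, if_true, List.length_cons] at hi
              simpa using ih.2.1 j (by omega)
        · intro c hc
          simp only [List.takeWhile_cons, h, if_true, List.length_cons,
            List.getElem?_cons_succ] at hc
          exact ih.2.2 c hc
      · simp only [Bool.not_eq_true] at h
        refine ⟨by simp [h], by simp [h], ?_⟩
        intro c hc
        simp only [List.takeWhile_cons, h, if_false, Bool.false_eq_true,
          List.length_nil, List.getElem?_cons_zero, Option.some_inj] at hc
        rw [← hc]; exact h

-- characterisation of A's outer loop via Chars.find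
theorem pvOuterA_spec (cs : List Char) :
    pvOuterA cs =
      if PySem.Chars.find cs ['C', 'V', 'E', '-'] = -1 then []
      else pvInnerA (cs.drop (PySem.Chars.find cs ['C', 'V', 'E', '-']).toNat) := by
  induction cs with
  | nil =>
      have : PySem.Chars.find ([] : List Char) ['C', 'V', 'E', '-'] = -1 := by decide
      simp [pvOuterA, this]
  | cons c rest ih =>
      have e : pvOuterA (c :: rest) =
          if (c :: rest).take 4 = ['C', 'V', 'E', '-'] then pvInnerA (c :: rest)
          else pvOuterA rest := rfl
      by_cases hp : ['C', 'V', 'E', '-'] <+: (c :: rest)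
      · have htake : (c :: rest).take 4 = ['C', 'V', 'E', '-'] :=
          (List.prefix_iff_eq_take.mp hp).symm
        have hf : PySem.Chars.find (c :: rest) ['C', 'V', 'E', '-'] = ((0 : ℕ) : Int) :=
          pv_find_eq (n := 0) (by simpa using hp) (by omega)
        rw [e, if_pos htake, hf]
        norm_num
      · have htake : ¬ (c :: rest).take 4 = ['C', 'V', 'E', '-'] := fun h => hp
          (List.prefix_iff_eq_take.mpr h.symm)
        by_cases hr : PySem.Chars.find rest ['C', 'V', 'E', '-'] = -1
        · have hni : ¬ ['C', 'V', 'E', '-'] <:+: rest :=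
            (PySem.Chars.find_eq_neg_one_iff _ _).mp hr
          have hcons : PySem.Chars.find (c :: rest) ['C', 'V', 'E', '-'] = -1 := by
            rw [PySem.Chars.find_eq_neg_one_iff]
            intro hin
            rcases (PySem.Chars.exists_prefix_drop_iff_isIn
              (s := c :: rest) (sub := ['C', 'V', 'E', '-'])).symm.mp
              ((PySem.Chars.isIn_iff_infix _ _).mpr hin) with ⟨j, hj⟩
            cases j with
            | zero => exact hp hj
            | succ k => exact hni (pv_infix_of_prefix_drop (n := k) hj)
          rw [e, if_neg htake, ih, if_pos hr, if_pos hcons]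
        · have hnn : 0 ≤ PySem.Chars.find rest ['C', 'V', 'E', '-'] := by
            have := PySem.Chars.neg_one_le_find (s := rest) (sub := ['C', 'V', 'E', '-'])
            omega
          obtain ⟨h1, h2⟩ := PySem.Chars.find_spec hnn
          set k := (PySem.Chars.find rest ['C', 'V', 'E', '-']).toNat with hk
          have hcons : PySem.Chars.find (c :: rest) ['C', 'V', 'E', '-'] = ((k + 1 : ℕ) : Int) := by
            apply pv_find_eq
            · simpa using h1
            · intro i hi
              cases i with
              | zero => exact hp
              | succ j => intro hpre; exact (h2 j (by omega)) (by simpa using hpre)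
          rw [e, if_neg htake, ih, if_neg hr, hcons, if_neg (by omega)]
          simp

-- the foldl over the two delimiter finds computes i + length of the token
theorem pv_fold_eq (cs : List Char) (i : ℕ) (hi : i ≤ cs.length) :
    [PySem.Chars.findFrom cs [' '] (i : Int) none,
     PySem.Chars.findFrom cs [','] (i : Int) none].foldl
      (fun e j => if j ≠ -1 then min e j else e) (cs.length : Int)
    = ((i + ((cs.drop i).takeWhile pvTok).length : ℕ) : Int) := by
  obtain ⟨hle, hall, hstop⟩ := pv_takeWhile_len pvTok (cs.drop i)
  set t := cs.drop i with ht
  set w := (t.takeWhile pvTok).length with hw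
  have hlen : cs.length = i + t.length := by
    rw [ht, List.length_drop]; omega
  -- characterise each delimiter findFrom: absent, or equal to i + (first index of d in t)
  have hchar : ∀ d : Char,
      (PySem.Chars.findFrom cs [d] (i : Int) none = -1 ∧ ∀ j < t.length, ¬ t[j]? = some d) ∨
      (∃ m : ℕ, PySem.Chars.findFrom cs [d] (i : Int) none = ((i + m : ℕ) : Int) ∧
        t[m]? = some d ∧ ∀ j < m, ¬ t[j]? = some d) := by
    intro d
    rw [PySem.Chars.findFrom_natCast cs [d] i hi, ← ht]
    by_cases hfd : PySem.Chars.find t [d] = -1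
    · left
      refine ⟨by rw [if_pos hfd], ?_⟩
      intro j hj hsome
      exact ((PySem.Chars.find_eq_neg_one_iff _ _).mp hfd)
        (pv_infix_of_prefix_drop (n := j) (pv_singleton_prefix_drop.mpr hsome))
    · right
      have hnn : 0 ≤ PySem.Chars.find t [d] := by
        have := PySem.Chars.neg_one_le_find (s := t) (sub := [d]); omega
      obtain ⟨h1, h2⟩ := PySem.Chars.find_spec hnn
      refine ⟨(PySem.Chars.find t [d]).toNat, ?_, pv_singleton_prefix_drop.mp h1, ?_⟩
      · rw [if_neg hfd]; push_cast; omega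
      · intro j hj hsome
        exact (h2 j hj) (pv_singleton_prefix_drop.mpr hsome)
  -- any occurrence of a delimiter in t is at index ≥ w
  have key : ∀ d : Char, (d = ' ' ∨ d = ',') → ∀ m : ℕ, t[m]? = some d → w ≤ m := by
    intro d hd m hm
    by_contra hlt
    obtain ⟨c, hc, hpc⟩ := hall m (by omega)
    rw [hm] at hc
    injection hc with hcd
    subst hcd
    rcases hd with rfl | rfl <;> simp [pvTok] at hpc
  by_cases hend : w = t.length
  · -- no delimiter occurs in t: both findFroms are -1
    have habs : ∀ d : Char, (d = ' ' ∨ d = ',') →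
        PySem.Chars.findFrom cs [d] (i : Int) none = -1 := by
      intro d hd
      rcases hchar d with ⟨h, _⟩ | ⟨m, hm, hsome, _⟩
      · exact h
      · have hmlt : m < t.length := by
          by_contra h
          simp [List.getElem?_eq_none (by omega : t.length ≤ m)] at hsome
        have := key d hd m hsome
        omega
    rw [habs ' ' (Or.inl rfl), habs ',' (Or.inr rfl)]
    simp only [List.foldl, ne_eq, not_true_eq_false, if_neg, not_false_iff]
    norm_num
    omega
  · -- the token stops at a delimiter d0 = t[w]
    have hwlt : w < t.length := by omega
    obtain ⟨d0, hd0⟩ : ∃ c, t[w]? = some c :=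
      ⟨t[w], (List.getElem?_eq_some_iff).mpr ⟨hwlt, rfl⟩⟩
    have hd0tok : pvTok d0 = false := hstop d0 hd0
    have hd0mem : d0 = ' ' ∨ d0 = ',' := by
      by_contra h
      rw [not_or] at h
      simp [pvTok, h.1, h.2] at hd0tok
    -- the findFrom for d0 equals i + w
    have hfd0 : PySem.Chars.findFrom cs [d0] (i : Int) none = ((i + w : ℕ) : Int) := by
      rcases hchar d0 with ⟨_, hnone⟩ | ⟨m, hm, hsome, hminm⟩
      · exact absurd hd0 (hnone w hwlt)
      · have h1 : w ≤ m := key d0 hd0mem m hsome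
        have h2 : ¬ w < m := fun hlt => (hminm w hlt) hd0
        have : m = w := by omega
        rw [this] at hm; exact hm
    -- the other delimiter's findFrom (if present) is ≥ i + w
    have hother : ∀ d : Char, (d = ' ' ∨ d = ',') →
        PySem.Chars.findFrom cs [d] (i : Int) none = -1 ∨
        ∃ m : ℕ, PySem.Chars.findFrom cs [d] (i : Int) none = ((i + m : ℕ) : Int) ∧ w ≤ m := by
      intro d hd
      rcases hchar d with ⟨h, _⟩ | ⟨m, hm, hsome, _⟩
      · exact Or.inl h
      · exact Or.inr ⟨m, hm, key d hd m hsome⟩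
    rcases hd0mem with rfl | rfl
    · rcases hother ',' (Or.inr rfl) with h | ⟨m, hm, hwm⟩
      · rw [hfd0, h]
        simp only [List.foldl, ne_eq]
        norm_num
        omega
      · rw [hfd0, hm]
        simp only [List.foldl, ne_eq]
        norm_num
        omega
    · rcases hother ' ' (Or.inl rfl) with h | ⟨m, hm, hwm⟩
      · rw [hfd0, h]
        simp only [List.foldl, ne_eq]
        norm_num
        omega
      · rw [hfd0, hm]
        simp only [List.foldl, ne_eq]
        norm_num
        omega

theorem pv_takeWhile_eq_take (p : Char → Bool) (t : List Char) :
    t.takeWhile p = t.take (t.takeWhile p).length :=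
  List.prefix_iff_eq_take.mp (List.takeWhile_prefix p)

-- ===== VERDICT (by name: the statement is the Claim_ definition above) =====
theorem get_cve_from_line_spec : Claim_equal_get_cve_from_line := by
  intro s _
  unfold Spec_get_cve_from_line get_cve_from_line get_cve_from_line_alt
  set cs := s.toList with hcs
  rw [pvOuterA_spec cs]
  by_cases h : PySem.Chars.find cs ['C', 'V', 'E', '-'] = -1
  · simp [h]
  · have hnn : 0 ≤ PySem.Chars.find cs ['C', 'V', 'E', '-'] := by
      have := PySem.Chars.neg_one_le_find (s := cs) (sub := ['C', 'V', 'E', '-'])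
      omega
    set j := (PySem.Chars.find cs ['C', 'V', 'E', '-']).toNat with hj
    have hji : PySem.Chars.find cs ['C', 'V', 'E', '-'] = (j : Int) := by omega
    have hjle : j ≤ cs.length := by
      have := PySem.Chars.find_le_length (s := cs) (sub := ['C', 'V', 'E', '-'])
      omega
    rw [if_neg h]
    simp only [h, if_neg, not_false_iff]
    rw [hji, pv_fold_eq cs j hjle, pvInnerA_eq_takeWhile]
    push_cast
    rw [PySem.List.slice_natCast_add]
    exact congrArg _ (pv_takeWhile_eq_take _ _)
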